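-- pv_equiv track=rewrite | github.com/zackjtl/AuraSVN | scripts/local_backend.py | split_command_line
-- ===== SOURCE A (Python) =====
-- def split_command_line(command):
--     parts = []
--     current = []
--     in_single = False
--     in_double = False
--     for char in command:
--         if char == "'" and not in_double:
--             in_single = not in_single
--             continue
--         if char == '"' and not in_single:
--             in_double = not in_double
--             continue
--         if char.isspace() and not in_single and not in_double:
--             if current:
--                 parts.append("".join(current))
--                 current = []
--             continue
--         current.append(char)
--     if current:
--         parts.append("".join(current))
--     return parts
-- ===== SOURCE B (Python) =====
-- def split_command_line(command):
--     parts = []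
--     current = []  # chunks of the token being built
--     i = 0
--     n = len(command)
--     while i < n:
--         char = command[i]
--         if char == "'" or char == '"':
--             j = command.find(char, i + 1)
--             if j == -1:
--                 current.append(command[i + 1:])
--                 i = n
--             else:
--                 current.append(command[i + 1:j])
--                 i = j + 1
--         elif char.isspace():
--             token = "".join(current)
--             if token:
--                 parts.append(token)
--             current = []
--             i += 1
--         else:
--             current.append(char)
--             i += 1
--     token = "".join(current)
--     if token:
--         parts.append(token)
--     return parts
-- ===== Notes on version B (the rewrite author's own statement) =====
-- stated objective: alternative
-- what changed: Replaces the per-character in_single/in_double toggling state machine with an index-driven scanner that, on a quote character, jumps directly to the matching quote via str.find and appends the quoted span as one unit; only the current-token accumulator remains as state.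
import Mathlib
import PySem

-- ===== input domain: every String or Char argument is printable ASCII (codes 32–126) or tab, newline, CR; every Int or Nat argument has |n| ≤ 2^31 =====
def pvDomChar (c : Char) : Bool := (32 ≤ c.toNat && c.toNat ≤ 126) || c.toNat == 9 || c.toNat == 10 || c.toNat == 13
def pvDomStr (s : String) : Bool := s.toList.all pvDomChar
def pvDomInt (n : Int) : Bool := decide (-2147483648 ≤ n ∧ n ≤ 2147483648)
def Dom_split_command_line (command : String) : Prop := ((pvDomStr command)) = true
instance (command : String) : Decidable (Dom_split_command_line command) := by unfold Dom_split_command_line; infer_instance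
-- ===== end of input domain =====

-- B replaces A's per-character in_single/in_double toggling with an index-driven scanner that
-- consumes each quoted span as a unit (jumping to the matching quote); same tokens, alternative shape.

-- ===== PORT A =====
-- state = (parts, current, in_single, in_double); the for-loop body, branch for branch
def pvStepA (st : List String × List Char × Bool × Bool) (c : Char) :
    List String × List Char × Bool × Bool :=
  let (parts, current, in_single, in_double) := st
  if c = '\'' && !in_double then (parts, current, !in_single, in_double)
  else if c = '"' && !in_single then (parts, current, in_single, !in_double)
  else if PySem.Chars.isspace c && !in_single && !in_double then
    if current ≠ [] then (parts ++ [String.mk current], [], in_single, in_double)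
    else (parts, current, in_single, in_double)
  else (parts, current ++ [c], in_single, in_double)

def split_command_line (command : String) : List String :=
  let st := command.toList.foldl pvStepA ([], [], false, false)
  let (parts, current, _, _) := st
  if current ≠ [] then parts ++ [String.mk current] else parts

-- ===== PORT B =====
-- index-driven scanner from Source B, on the character list: a quote jumps to its matching quote
-- (List.idxOf? plays command.find(char, i+1)); only the current-token accumulator is state
def pvScanB (cs : List Char) (current : List Char) (parts : List String) : List String :=
  match cs with
  | [] => if current ≠ [] then parts ++ [String.mk current] else parts
  | c :: rest =>
    if c = '\'' || c = '"' then
      match rest.idxOf? c with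
      | none =>
        let current' := current ++ rest
        if current' ≠ [] then parts ++ [String.mk current'] else parts
      | some j => pvScanB (rest.drop (j + 1)) (current ++ rest.take j) parts
    else if PySem.Chars.isspace c then
      if current ≠ [] then pvScanB rest [] (parts ++ [String.mk current])
      else pvScanB rest [] parts
    else pvScanB rest (current ++ [c]) parts
termination_by cs.length
decreasing_by
  all_goals simp [List.length_drop]

def split_command_line_alt (command : String) : List String :=
  pvScanB command.toList [] []

-- ===== PRECONDITION & SPEC =====
def Spec_split_command_line (command : String) (out : List String) : Prop := out = split_command_line_alt command
instance (command : String) (out : List String) : Decidable (Spec_split_command_line command out) := by unfold Spec_split_command_line; infer_instance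

-- ===== CLAIM (what is proved, stated in full; the proofs are below) =====
def Claim_equal_split_command_line : Prop := ∀ (command : String), Dom_split_command_line command → Spec_split_command_line command (split_command_line command)

-- ===== LEMMAS AND PROOFS =====

-- unfolding lemmas for the well-founded pvScanB
theorem pvScanB_nil (cur : List Char) (parts : List String) :
    pvScanB [] cur parts = if cur ≠ [] then parts ++ [String.mk cur] else parts := by
  rw [pvScanB.eq_def]

theorem pvScanB_quote_none (c : Char) (rest cur : List Char) (parts : List String)
    (hb : (c = '\'' || c = '"') = true) (hidx : rest.idxOf? c = none) :
    pvScanB (c :: rest) cur parts =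
      if cur ++ rest ≠ [] then parts ++ [String.mk (cur ++ rest)] else parts := by
  rw [pvScanB.eq_def]
  simp only [hb, if_true, hidx]

theorem pvScanB_quote_some (c : Char) (rest cur : List Char) (parts : List String) (j : ℕ)
    (hb : (c = '\'' || c = '"') = true) (hidx : rest.idxOf? c = some j) :
    pvScanB (c :: rest) cur parts = pvScanB (rest.drop (j + 1)) (cur ++ rest.take j) parts := by
  rw [pvScanB.eq_def]
  simp only [hb, if_true, hidx]

theorem pvScanB_space (c : Char) (rest cur : List Char) (parts : List String)
    (hb : (c = '\'' || c = '"') = false) (hs : PySem.Chars.isspace c = true) :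
    pvScanB (c :: rest) cur parts =
      if cur ≠ [] then pvScanB rest [] (parts ++ [String.mk cur]) else pvScanB rest [] parts := by
  rw [pvScanB.eq_def]
  simp only [hb, Bool.false_eq_true, if_false, hs, if_true]

theorem pvScanB_plain (c : Char) (rest cur : List Char) (parts : List String)
    (hb : (c = '\'' || c = '"') = false) (hs : PySem.Chars.isspace c = false) :
    pvScanB (c :: rest) cur parts = pvScanB rest (cur ++ [c]) parts := by
  rw [pvScanB.eq_def]
  simp only [hb, Bool.false_eq_true, if_false, hs]

-- inside a quote opened by q, A's fold runs to the first q (or the end) appending verbatim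
theorem pvFoldA_inquote (q : Char) (hq : q = '\'' ∨ q = '"') :
    ∀ (l : List Char) (parts : List String) (cur : List Char),
    l.foldl pvStepA (parts, cur, (q = '\'' : Bool), (q = '"' : Bool)) =
      (match l.idxOf? q with
       | none => (parts, cur ++ l, (q = '\'' : Bool), (q = '"' : Bool))
       | some j => (l.drop (j + 1)).foldl pvStepA (parts, cur ++ l.take j, false, false)) := by
  intro l
  induction l with
  | nil => intro parts cur; simp [List.idxOf?]
  | cons c rest ih =>
    intro parts cur
    by_cases hc : c = q
    · subst hc
      rcases hq with h | h <;> subst h <;>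
        simp [List.foldl_cons, pvStepA, List.idxOf?, List.findIdx?_cons]
    · have hstep : pvStepA (parts, cur, (q = '\'' : Bool), (q = '"' : Bool)) c =
          (parts, cur ++ [c], (q = '\'' : Bool), (q = '"' : Bool)) := by
        rcases hq with h | h <;> subst h <;>
          simp_all [pvStepA]
      have hidx : (c :: rest).idxOf? q = (rest.idxOf? q).map (· + 1) := by
        simp [List.idxOf?, List.findIdx?_cons, beq_iff_eq, hc]
      rw [List.foldl_cons, hstep, ih, hidx]
      cases hr : rest.idxOf? q with
      | none => simp
      | some j => simp

theorem pvFoldA_eq_scanB :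
    ∀ (n : ℕ) (l : List Char), l.length ≤ n → ∀ (parts : List String) (cur : List Char),
    (let (p, c, _, _) := l.foldl pvStepA (parts, cur, false, false)
     if c ≠ [] then p ++ [String.mk c] else p) = pvScanB l cur parts := by
  intro n
  induction n with
  | zero =>
    intro l hl parts cur
    have : l = [] := List.eq_nil_of_length_eq_zero (Nat.le_zero.mp hl)
    subst this; simp [pvScanB_nil]
  | succ n ih =>
    intro l hl parts cur
    cases l with
    | nil => simp [pvScanB_nil]
    | cons c rest =>
      have hrest : rest.length ≤ n := by simpa using Nat.succ_le_succ_iff.mp hl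
      by_cases hq : c = '\'' ∨ c = '"'
      · have hb : (c = '\'' || c = '"') = true := by
          rcases hq with h | h <;> simp [h]
        have hstep : pvStepA (parts, cur, false, false) c =
            (parts, cur, (c = '\'' : Bool), (c = '"' : Bool)) := by
          rcases hq with h | h <;> subst h <;> simp [pvStepA]
        rw [List.foldl_cons, hstep, pvFoldA_inquote c hq rest parts cur]
        cases hidx : rest.idxOf? c with
        | none =>
          rw [pvScanB_quote_none c rest cur parts hb hidx]
        | some j =>
          have hdrop : (rest.drop (j + 1)).length ≤ n := by
            simp [List.length_drop]; omega
          rw [pvScanB_quote_some c rest cur parts j hb hidx]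
          exact ih _ hdrop parts (cur ++ rest.take j)
      · have hb : (c = '\'' || c = '"') = false := by
          simp only [Bool.or_eq_false_iff, decide_eq_false_iff_not]
          exact ⟨fun h => hq (Or.inl h), fun h => hq (Or.inr h)⟩
        have hc1 : (c = '\'' : Bool) = false := by
          simp only [decide_eq_false_iff_not]; exact fun h => hq (Or.inl h)
        have hc2 : (c = '"' : Bool) = false := by
          simp only [decide_eq_false_iff_not]; exact fun h => hq (Or.inr h)
        by_cases hs : PySem.Chars.isspace c = true
        · rw [pvScanB_space c rest cur parts hb hs]
          by_cases hcur : cur = []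
          · subst hcur
            have hstep : pvStepA (parts, [], false, false) c = (parts, [], false, false) := by
              simp [pvStepA, hc1, hc2, hs]
            rw [List.foldl_cons, hstep, ih _ hrest parts []]
            simp
          · have hstep : pvStepA (parts, cur, false, false) c =
                (parts ++ [String.mk cur], [], false, false) := by
              simp [pvStepA, hc1, hc2, hs, hcur]
            rw [List.foldl_cons, hstep, ih _ hrest (parts ++ [String.mk cur]) []]
            simp [hcur]
        · have hs' : PySem.Chars.isspace c = false := by
            simpa using hs
          have hstep : pvStepA (parts, cur, false, false) c =
              (parts, cur ++ [c], false, false) := by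
            simp [pvStepA, hc1, hc2, hs']
          rw [List.foldl_cons, hstep, ih _ hrest parts (cur ++ [c]),
            pvScanB_plain c rest cur parts hb hs']

-- ===== VERDICT (by name: the statement is the Claim_ definition above) =====
theorem split_command_line_spec : Claim_equal_split_command_line := by
  intro command _
  unfold Spec_split_command_line split_command_line split_command_line_alt
  exact pvFoldA_eq_scanB command.toList.length command.toList (Nat.le_refl _) [] []
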